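-- pv_equiv track=rewrite | github.com/miliar/Code_Jam_Webscraper | solutions_python/Problem_199/524.py | calc
-- ===== SOURCE A (Python) =====
-- from collections import deque
--
-- def calc(pan,k):
-- 	flip = 0
-- 	pan = [i=='+' for i in pan]
-- 	due = deque()
-- 	state = ''
-- 	flips = False
-- 	for j,i in enumerate(pan):
-- 		if due and due[0] == j:
-- 			due.popleft()
-- 			flips = not flips
-- 		if flips:
-- 			i = not i
-- 		if not i:
-- 			flip += 1
-- 			flips = not flips
-- 			due.append(j+k)
-- 	if due and due[0] == len(pan):
-- 		due.popleft()
-- 	if due: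
-- 		return 'IMPOSSIBLE'
-- 	return str(flip)
-- ===== SOURCE B (Python) =====
-- def calc(pan, k):
--     # difference-domain algorithm: a flip starting at j toggles only e[j] and e[j+k],
--     # so the forced start flags follow f[j] = e[j] ^ f[j-k] with no window bookkeeping.
--     n = len(pan)
--     minus = [c != '+' for c in pan]
--     flips = 0
--     f = []
--     for j in range(n):
--         e = minus[j] ^ (minus[j - 1] if j > 0 else False)
--         fj = e ^ (f[j - k] if 1 <= k <= j else False)
--         if fj:
--             if k < 1 or j + k > n:
--                 return 'IMPOSSIBLE'
--             flips += 1
--         f.append(fj)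
--     return str(flips)
-- ===== Notes on version B (the rewrite author's own statement) =====
-- stated objective: alternative
-- what changed: Works in the difference domain instead of simulating the window: B never tracks an active-flip parity or expiry structure; it computes the boundary array e[j]=minus[j]^minus[j-1], reads each forced start directly as f[j]=e[j]^f[j-k] (a single point lookup, since a flip toggles only the two boundary points j and j+k), and early-returns IMPOSSIBLE when a forced start cannot fit.
import Mathlib
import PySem

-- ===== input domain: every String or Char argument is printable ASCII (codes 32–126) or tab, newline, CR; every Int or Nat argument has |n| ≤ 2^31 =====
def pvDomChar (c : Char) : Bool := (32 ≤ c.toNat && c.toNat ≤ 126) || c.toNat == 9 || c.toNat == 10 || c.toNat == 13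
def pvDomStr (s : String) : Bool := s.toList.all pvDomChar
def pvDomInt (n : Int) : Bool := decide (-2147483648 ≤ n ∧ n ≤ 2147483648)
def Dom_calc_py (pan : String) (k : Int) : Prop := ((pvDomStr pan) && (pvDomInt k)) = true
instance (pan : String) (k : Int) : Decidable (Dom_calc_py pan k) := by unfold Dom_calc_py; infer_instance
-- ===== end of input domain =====

-- B works in the difference domain (boundary array, each flip touches two points) instead of simulating the sliding window with a deque; alternative algorithm, same O(n) cost.

-- ===== PORT A =====
-- one iteration of A's loop body; state = (flip, due, flips)
def calcAStep (k : Int) (st : Int × List Int × Bool) (ji : Int × Bool) : Int × List Int × Bool :=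
  let flip := st.1
  let due := st.2.1
  let flips := st.2.2
  let j := ji.1
  -- if due and due[0] == j: due.popleft(); flips = not flips
  let pop : Bool := match due with | d :: _ => decide (d = j) | [] => false
  let due := if pop then due.tail else due
  let flips := if pop then !flips else flips
  -- if flips: i = not i
  let i := if flips then !ji.2 else ji.2
  -- if not i: flip += 1; flips = not flips; due.append(j+k)
  if i = false then (flip + 1, due ++ [j + k], !flips) else (flip, due, flips)

def calc_py (pan : String) (k : Int) : String :=
  let panB := pan.toList.map (fun c => c == '+')           -- pan = [i=='+' for i in pan]
  let st := (PySem.List.enumerate panB).foldl (calcAStep k) (0, [], false)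
  -- if due and due[0] == len(pan): due.popleft()
  let due1 := match st.2.1 with
    | d :: rest => if d = (panB.length : Int) then rest else d :: rest
    | [] => []
  if due1.isEmpty then PySem.Int.toStr st.1 else "IMPOSSIBLE"

-- ===== PORT B =====
-- the loop of Source B: j = f.length, e = boundary flag, fj = e ^ f[j-k]; early return on an unfittable flip
def calcBGo (minus : List Bool) (k : Int) (flips : Int) (f : List Bool) : Nat → String
  | 0 => PySem.Int.toStr flips
  | rem + 1 =>
    let j := f.length
    let e := (minus.getD j false).xor (if 0 < j then minus.getD (j - 1) false else false)
    let fj := e.xor (if 1 ≤ k ∧ k ≤ (j : Int) then f.getD (j - k.toNat) false else false)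
    if fj then
      if k < 1 ∨ (j : Int) + k > (minus.length : Int) then "IMPOSSIBLE"
      else calcBGo minus k (flips + 1) (f ++ [fj]) rem
    else calcBGo minus k flips (f ++ [fj]) rem

def calc_py_alt (pan : String) (k : Int) : String :=
  let minus := pan.toList.map (fun c => c != '+')
  calcBGo minus k 0 [] pan.toList.length

-- ===== PRECONDITION & SPEC =====
def Spec_calc_py (pan : String) (k : Int) (out : String) : Prop := out = calc_py_alt pan k
instance (pan : String) (k : Int) (out : String) : Decidable (Spec_calc_py pan k out) := by unfold Spec_calc_py; infer_instance

-- ===== CLAIM (what is proved, stated in full; the proofs are below) =====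
def Claim_equal_calc_py : Prop := ∀ (pan : String) (k : Int), Dom_calc_py pan k → Spec_calc_py pan k (calc_py pan k)

-- ===== LEMMAS AND PROOFS =====

-- Shared reference description: fl is the list of "a forced flip starts here" flags.
def startB (fl : List Bool) (s : Nat) : Bool := fl.getD s false

def cnt (fl : List Bool) : Int := (fl.countP id : Int)

-- first start index still pending at position j (inclusive bound) / after the pop at j (strict bound)
def lowIdx (k : Int) (j : Nat) : Nat := if 1 ≤ k then j - k.toNat else 0
def lowIdx' (k : Int) (j : Nat) : Nat := if 1 ≤ k then j + 1 - k.toNat else 0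

-- A's deque as a function of the flags: expiry times s+k of the pending starts s ≥ c
def dueFrom (k : Int) (fl : List Bool) (c : Nat) : List Int :=
  ((List.range' c (fl.length - c)).filter (fun s => startB fl s)).map (fun (s : Nat) => (s : Int) + k)

def dueOf (k : Int) (fl : List Bool) : List Int := dueFrom k fl (lowIdx k fl.length)
def duePost (k : Int) (fl : List Bool) : List Int := dueFrom k fl (lowIdx' k fl.length)

def stOf (k : Int) (fl : List Bool) : Int × List Int × Bool :=
  (cnt fl, dueOf k fl, decide ((dueOf k fl).length % 2 = 1))

-- the decision both programs take at position fl.length on a character with truth value b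
def decideStart (k : Int) (fl : List Bool) (b : Bool) : Bool :=
  b == decide ((duePost k fl).length % 2 = 1)

-- the flags produced by processing the remaining characters
def extFl (k : Int) (fl : List Bool) : List Char → List Bool
  | [] => fl
  | c :: cs => extFl k (fl ++ [decideStart k fl (c == '+')]) cs

-- B-side abbreviations matching the port's subexpressions
def mPrevB (minus : List Bool) (j : Nat) : Bool := if 0 < j then minus.getD (j - 1) false else false
def prevB (k : Int) (f : List Bool) : Bool :=
  if 1 ≤ k ∧ k ≤ (f.length : Int) then f.getD (f.length - k.toNat) false else false
def parB (k : Int) (fl : List Bool) : Bool := decide ((duePost k fl).length % 2 = 1)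

lemma dueFrom_head (k : Int) (fl : List Bool) (c : Nat) (h : c < fl.length) :
    dueFrom k fl c = (if fl.getD c false then [(c : Int) + k] else []) ++ dueFrom k fl (c + 1) := by
  unfold dueFrom
  have h1 : fl.length - c = (fl.length - (c+1)) + 1 := by omega
  rw [h1, List.range'_succ]
  rw [List.getD_eq_getElem?_getD]
  by_cases hc : fl[c]?.getD false = true <;> simp [startB, hc]

lemma dueFrom_length (k : Int) (fl : List Bool) (c : Nat) :
    (dueFrom k fl c).length = (fl.drop c).countP id := by
  suffices H : ∀ m c, fl.length ≤ c + m → (dueFrom k fl c).length = (fl.drop c).countP id from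
    H fl.length c (by omega)
  intro m
  induction m with
  | zero =>
    intro c hc
    have h0 : fl.length - c = 0 := by omega
    simp [dueFrom, h0, List.drop_eq_nil_of_le (by omega : fl.length ≤ c)]
  | succ m ih =>
    intro c hc
    rcases Nat.lt_or_ge c fl.length with h | h
    · rw [dueFrom_head k fl c h, List.drop_eq_getElem_cons h, List.length_append,
        ih (c+1) (by omega), List.countP_cons]
      rw [List.getD_eq_getElem fl false h]
      by_cases hb : fl[c] = true <;> simp [hb] <;> omega
    · have h0 : fl.length - c = 0 := by omega
      simp [dueFrom, h0, List.drop_eq_nil_of_le h]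

lemma dueFrom_append (k : Int) (fl : List Bool) (d : Bool) (c : Nat) (h : c ≤ fl.length) :
    dueFrom k (fl ++ [d]) c = dueFrom k fl c ++ (if d then [(fl.length : Int) + k] else []) := by
  unfold dueFrom
  have h1 : (fl ++ [d]).length - c = (fl.length - c) + 1 := by
    rw [List.length_append]; simp; omega
  have h2 : List.range' c (fl.length - c + 1) = List.range' c (fl.length - c) ++ [fl.length] := by
    have h3 := List.range'_1_concat (s := c) (n := fl.length - c)
    rw [h3]; congr 2; omega
  rw [h1, h2, List.filter_append, List.map_append]
  congr 1
  · congr 1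
    apply List.filter_congr
    intro s hs
    have hslt : s < fl.length := by
      have := List.mem_range'_1.mp hs; omega
    simp [startB, List.getD_eq_getElem?_getD, List.getElem?_append_left hslt]
  · by_cases hd : d = true <;>
      simp [startB, List.getD, hd]

lemma lowIdx'_le (k : Int) (j : Nat) : lowIdx' k j ≤ j := by
  unfold lowIdx'; split <;> omega

lemma dueOf_append (k : Int) (fl : List Bool) (d : Bool) :
    dueOf k (fl ++ [d]) = duePost k fl ++ (if d then [(fl.length : Int) + k] else []) := by
  unfold dueOf duePost
  have h1 : lowIdx k (fl ++ [d]).length = lowIdx' k fl.length := by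
    unfold lowIdx lowIdx'; simp
  rw [h1, dueFrom_append k fl d _ (lowIdx'_le k fl.length)]

-- pending expiry times after the pop are never the current index
lemma duePost_ne (k : Int) (fl : List Bool) (x : Int) (hx : x ∈ duePost k fl) :
    x ≠ (fl.length : Int) := by
  unfold duePost dueFrom at hx
  obtain ⟨s, hs, rfl⟩ := List.mem_map.mp hx
  have hs2 := List.mem_range'_1.mp (List.mem_filter.mp hs).1
  by_cases hk : 1 ≤ k
  · have h1 : lowIdx' k fl.length = fl.length + 1 - k.toNat := by unfold lowIdx'; simp [hk]
    have h2 : (k.toNat : Int) = k := Int.toNat_of_nonneg (by omega)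
    rw [h1] at hs2
    omega
  · have h2 : k ≤ 0 := by omega
    omega

-- dueOf is duePost with possibly the expiring element (expiry = current index) in front
lemma dueOf_split (k : Int) (fl : List Bool) :
    dueOf k fl =
      (if 1 ≤ k ∧ k.toNat ≤ fl.length ∧ fl.getD (fl.length - k.toNat) false = true
       then ((fl.length : Int) :: duePost k fl) else duePost k fl) := by
  unfold dueOf duePost
  by_cases hk : 1 ≤ k
  · by_cases hle : k.toNat ≤ fl.length
    · have hkt : 1 ≤ k.toNat := by omega
      have hc : lowIdx k fl.length < fl.length := by unfold lowIdx; simp [hk]; omega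
      rw [dueFrom_head k fl _ hc]
      have h1 : lowIdx k fl.length = fl.length - k.toNat := by unfold lowIdx; simp [hk]
      have h2 : lowIdx k fl.length + 1 = lowIdx' k fl.length := by
        unfold lowIdx lowIdx'; simp [hk]; omega
      have h3 : ((lowIdx k fl.length : Nat) : Int) + k = (fl.length : Int) := by
        have h4 : (k.toNat : Int) = k := Int.toNat_of_nonneg (by omega)
        rw [h1]; omega
      rw [h2, h3, h1]
      by_cases hd : fl[fl.length - k.toNat]?.getD false = true <;>
        simp [hk, hle, hd, List.getD_eq_getElem?_getD]
    · have h1 : lowIdx k fl.length = lowIdx' k fl.length := by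
        unfold lowIdx lowIdx'; simp [hk]; omega
      rw [h1]; simp [hle]
  · have h1 : lowIdx k fl.length = lowIdx' k fl.length := by unfold lowIdx lowIdx'; simp [hk]
    rw [h1]; simp [hk]

lemma cnt_append (fl : List Bool) (d : Bool) : cnt (fl ++ [d]) = cnt fl + if d then 1 else 0 := by
  unfold cnt; cases d <;> simp [List.countP_append]

lemma stepA_eq (k : Int) (fl : List Bool) (b : Bool) :
    calcAStep k (stOf k fl) ((fl.length : Int), b) = stOf k (fl ++ [decideStart k fl b]) := by
  have hsplit := dueOf_split k fl
  by_cases hP : 1 ≤ k ∧ k.toNat ≤ fl.length ∧ fl.getD (fl.length - k.toNat) false = true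
  · rw [if_pos hP] at hsplit
    simp only [calcAStep, stOf, hsplit, decideStart, cnt_append, dueOf_append]
    by_cases hm : (duePost k fl).length % 2 = 1 <;> cases b <;>
      simp_all [cnt_append, dueOf_append, Nat.add_mod] <;> omega
  · rw [if_neg hP] at hsplit
    have hpop : (match duePost k fl with | d :: _ => decide (d = (fl.length : Int)) | [] => false) = false := by
      cases hdp : duePost k fl with
      | nil => rfl
      | cons d rest =>
        have : d ≠ (fl.length : Int) := duePost_ne k fl d (by rw [hdp]; simp)
        simp [this]
    simp only [calcAStep, stOf, hsplit, decideStart, hpop]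
    by_cases hm : (duePost k fl).length % 2 = 1 <;> cases b <;>
      simp_all [cnt_append, dueOf_append, Nat.add_mod] <;> omega

lemma enumerate_map {α β : Type} (f : α → β) (l : List α) (s : Int) :
    PySem.List.enumerate (l.map f) s = (PySem.List.enumerate l s).map (fun p => (p.1, f p.2)) := by
  induction l generalizing s <;> simp_all [PySem.List.enumerate_cons]

lemma simA (k : Int) (cs : List Char) : ∀ (fl : List Bool),
    (PySem.List.enumerate cs ((fl.length : Int))).foldl
      (fun st p => calcAStep k st (p.1, p.2 == '+')) (stOf k fl) = stOf k (extFl k fl cs) := by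
  induction cs with
  | nil => intro fl; simp [PySem.List.enumerate, extFl]
  | cons c cs ih =>
    intro fl
    rw [PySem.List.enumerate_cons]
    simp only [List.foldl_cons]
    rw [stepA_eq, extFl]
    have h := ih (fl ++ [decideStart k fl (c == '+')])
    simpa using h

lemma extFl_length (k : Int) (cs : List Char) : ∀ (fl : List Bool),
    (extFl k fl cs).length = fl.length + cs.length := by
  induction cs with
  | nil => intro fl; simp [extFl]
  | cons c cs ih => intro fl; rw [extFl]; rw [ih]; simp; omega

lemma stOf_nil (k : Int) : stOf k [] = (0, [], false) := by
  have h : dueOf k [] = [] := by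
    unfold dueOf dueFrom lowIdx; split <;> simp
  simp [stOf, h, cnt]

-- A's result in terms of the greedy flag list
lemma A_char (pan : String) (k : Int) :
    calc_py pan k =
      (if duePost k (extFl k [] pan.toList) = []
       then PySem.Int.toStr (cnt (extFl k [] pan.toList)) else "IMPOSSIBLE") := by
  unfold calc_py
  dsimp only
  have hA0 : (PySem.List.enumerate (pan.toList.map (fun c => c == '+'))).foldl
      (calcAStep k) (0, [], false) = stOf k (extFl k [] pan.toList) := by
    rw [enumerate_map, List.foldl_map, ← stOf_nil k]
    have h := simA k pan.toList []
    simpa using h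
  set FL := extFl k [] pan.toList with hFL
  have hlen : FL.length = pan.toList.length := by
    rw [hFL]; simpa using extFl_length k pan.toList []
  rw [hA0]
  have hn : ((pan.toList.map (fun c => c == '+')).length : Int) = (FL.length : Int) := by
    simp [hlen]
  have hdue1 : (match (stOf k FL).2.1 with
      | d :: rest => if d = ((pan.toList.map (fun c => c == '+')).length : Int) then rest else d :: rest
      | [] => ([] : List Int)) = duePost k FL := by
    rw [hn]
    show (match dueOf k FL with
      | d :: rest => if d = (FL.length : Int) then rest else d :: rest
      | [] => ([] : List Int)) = duePost k FL
    rw [dueOf_split k FL]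
    by_cases hP : 1 ≤ k ∧ k.toNat ≤ FL.length ∧ FL.getD (FL.length - k.toNat) false = true
    · obtain ⟨hk1, hk2, hd⟩ := hP
      rw [List.getD_eq_getElem?_getD] at hd
      simp [hk1, hk2, hd, List.getD_eq_getElem?_getD]
    · rw [if_neg hP]
      cases hdp : duePost k FL with
      | nil => rfl
      | cons d rest =>
        have hne : d ≠ (FL.length : Int) := duePost_ne k FL d (by rw [hdp]; simp)
        simp [hne]
  simp only [hdue1]
  cases hdp : duePost k FL with
  | nil => simp [hdp, stOf]
  | cons d rest => simp [hdp, stOf]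

-- counting a drop one step at a time
lemma drop_countP_step (l : List Bool) (c : Nat) (h : c ≤ l.length) :
    (l.drop c).countP id = (if l.getD c false then 1 else 0) + (l.drop (c+1)).countP id := by
  rcases Nat.lt_or_ge c l.length with hlt | hge
  · rw [List.drop_eq_getElem_cons hlt, List.countP_cons, List.getD_eq_getElem l false hlt]
    by_cases hb : l[c] = true <;> simp [hb] <;> omega
  · have h1 : c = l.length := by omega
    subst h1
    rw [List.drop_eq_nil_of_le (le_refl l.length),
      List.drop_eq_nil_of_le (by omega : l.length ≤ l.length + 1)]
    simp [List.getD_eq_getElem?_getD]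

lemma parB_eq_count (k : Int) (fl : List Bool) :
    parB k fl = decide ((fl.drop (lowIdx' k fl.length)).countP id % 2 = 1) := by
  unfold parB duePost
  rw [dueFrom_length]

-- pure Boolean/parity facts used by the invariant step
lemma parity_bool (a : Nat) (g d m mp P : Bool)
    (hd : d = ((m.xor mp).xor P))
    (h : decide (((if g then 1 else 0) + a) % 2 = 1) = mp.xor P) :
    decide ((a + (if d then 1 else 0)) % 2 = 1) = m.xor g := by
  subst hd; cases g <;> cases m <;> cases mp <;> cases P <;> simp_all <;> omega

lemma parity_bool0 (a : Nat) (d m mp : Bool)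
    (hd : d = m.xor mp) (h : decide (a % 2 = 1) = mp) :
    decide ((a + (if d then 1 else 0)) % 2 = 1) = m := by
  subst hd; cases m <;> cases mp <;> simp_all <;> omega

-- the invariant: the window parity A maintains equals (previous char is unhappy) XOR f[j-k]
lemma inv_step (k : Int) (minus fl : List Bool) (d : Bool)
    (hd : d = (((minus.getD fl.length false).xor (mPrevB minus fl.length)).xor (prevB k fl)))
    (hinv : parB k fl = ((mPrevB minus fl.length).xor (prevB k fl))) :
    parB k (fl ++ [d]) = ((mPrevB minus (fl.length + 1)).xor (prevB k (fl ++ [d]))) := by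
  have hmp1 : mPrevB minus (fl.length + 1) = minus.getD fl.length false := by
    unfold mPrevB; simp
  rw [hmp1]
  set j := fl.length with hj
  rw [parB_eq_count] at hinv ⊢
  by_cases hk : 1 ≤ k
  · have hkk : (k.toNat : Int) = k := Int.toNat_of_nonneg (by omega)
    have hK1 : 1 ≤ k.toNat := by omega
    have hlow : lowIdx' k j = j + 1 - k.toNat := by unfold lowIdx'; simp [hk]
    have hlow' : lowIdx' k (fl ++ [d]).length = j + 2 - k.toNat := by
      unfold lowIdx'; simp [hk]; omega
    by_cases hk1 : k.toNat = 1
    · -- window of size 1: both duePosts are empty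
      have h0 : (fl.drop (lowIdx' k j)).countP id = 0 := by
        rw [hlow, hk1]
        have : fl.length ≤ j + 1 - 1 := by omega
        rw [List.drop_eq_nil_of_le this]
        rfl
      have h0' : ((fl ++ [d]).drop (lowIdx' k (fl ++ [d]).length)).countP id = 0 := by
        rw [hlow', hk1]
        have : (fl ++ [d]).length ≤ j + 2 - 1 := by simp [hj]
        rw [List.drop_eq_nil_of_le this]
        rfl
      rw [h0] at hinv; rw [h0']
      have hprev' : prevB k (fl ++ [d]) = d := by
        unfold prevB
        rw [if_pos ⟨hk, by simp [hj]; omega⟩]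
        simp [hk1, hj]
      rw [hprev']
      have hmpP : (mPrevB minus j).xor (prevB k fl) = false := by rw [← hinv]; decide
      rw [hd]
      have : ((minus.getD j false).xor (mPrevB minus j)).xor (prevB k fl)
          = (minus.getD j false).xor ((mPrevB minus j).xor (prevB k fl)) := by
        cases (minus.getD j false) <;> cases (mPrevB minus j) <;> cases (prevB k fl) <;> rfl
      rw [this, hmpP]
      cases (minus.getD j false) <;> decide
    · by_cases hKle : k.toNat ≤ j + 1
      · -- general case: the window slides by one
        have hK2 : 2 ≤ k.toNat := by omega
        set c := j + 1 - k.toNat with hc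
        have hcj : c < j := by omega
        have hc' : lowIdx' k (fl ++ [d]).length = c + 1 := by rw [hlow']; omega
        have hcl : lowIdx' k j = c := hlow
        have hdropA : (fl ++ [d]).drop (c + 1) = fl.drop (c + 1) ++ [d] := by
          rw [List.drop_append_of_le_length (by omega)]
        have hcount' : ((fl ++ [d]).drop (lowIdx' k (fl ++ [d]).length)).countP id
            = (fl.drop (c + 1)).countP id + (if d then 1 else 0) := by
          rw [hc', hdropA, List.countP_append]
          cases d <;> simp
        have hcount : (fl.drop c).countP id
            = (if fl.getD c false then 1 else 0) + (fl.drop (c + 1)).countP id :=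
          drop_countP_step fl c (by omega)
        have hprev' : prevB k (fl ++ [d]) = fl.getD c false := by
          unfold prevB
          rw [if_pos ⟨hk, by simp [hj]; omega⟩]
          have hix : (fl ++ [d]).length - k.toNat = c := by simp [hj]; omega
          rw [hix, List.getD_eq_getElem?_getD, List.getElem?_append_left (by omega : c < fl.length),
            ← List.getD_eq_getElem?_getD]
        rw [hcount', hprev']
        rw [hcl, hcount] at hinv
        exact parity_bool _ _ _ _ _ _ hd hinv
      · -- k larger than the prefix: no element leaves the window, prev flags are false
        have hc0 : lowIdx' k j = 0 := by rw [hlow]; omega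
        have hc0' : lowIdx' k (fl ++ [d]).length = 0 := by rw [hlow']; omega
        have hprev : prevB k fl = false := by
          unfold prevB
          rw [if_neg]; intro ⟨_, h2⟩; rw [← hj] at h2; omega
        have hprev' : prevB k (fl ++ [d]) = false := by
          unfold prevB
          rw [if_neg]; intro ⟨_, h2⟩
          have : (fl ++ [d]).length = j + 1 := by simp [hj]
          rw [this] at h2; omega
        rw [hprev] at hinv hd
        rw [hprev', hc0']
        rw [hc0] at hinv
        have hcount' : ((fl ++ [d]).drop 0).countP id
            = (fl.drop 0).countP id + (if d then 1 else 0) := by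
          simp only [List.drop_zero, List.countP_append]
          cases d <;> simp
        rw [hcount']
        have hxf : ∀ x : Bool, x.xor false = x := by decide
        rw [hxf] at hinv
        rw [hxf]
        exact parity_bool0 _ _ _ _ (by rw [hd]; cases (minus.getD j false) <;> cases (mPrevB minus j) <;> rfl) hinv
  · -- k < 1: flips never expire; both cutoffs are 0 and prev flags are false
    have hc0 : lowIdx' k j = 0 := by unfold lowIdx'; simp [hk]
    have hc0' : lowIdx' k (fl ++ [d]).length = 0 := by unfold lowIdx'; simp [hk]
    have hprev : prevB k fl = false := by
      unfold prevB; rw [if_neg]; intro ⟨h1, _⟩; exact hk h1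
    have hprev' : prevB k (fl ++ [d]) = false := by
      unfold prevB; rw [if_neg]; intro ⟨h1, _⟩; exact hk h1
    rw [hprev] at hinv hd
    rw [hprev', hc0']
    rw [hc0] at hinv
    have hcount' : ((fl ++ [d]).drop 0).countP id
        = (fl.drop 0).countP id + (if d then 1 else 0) := by
      simp only [List.drop_zero, List.countP_append]
      cases d <;> simp
    rw [hcount']
    have hxf : ∀ x : Bool, x.xor false = x := by decide
    rw [hxf] at hinv
    rw [hxf]
    exact parity_bool0 _ _ _ _ (by rw [hd]; cases (minus.getD j false) <;> cases (mPrevB minus j) <;> rfl) hinv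

-- if every start fits (s + k ≤ n, k ≥ 1), nothing is pending at the end
lemma duePost_nil_of_feas (k : Int) (fl : List Bool)
    (h : ∀ s, s < fl.length → fl.getD s false = true → 1 ≤ k ∧ (s : Int) + k ≤ (fl.length : Int)) :
    duePost k fl = [] := by
  unfold duePost dueFrom
  rw [List.filter_eq_nil_iff.mpr, List.map_nil]
  intro s hs
  have hs2 := List.mem_range'_1.mp hs
  have hslt : s < fl.length := by omega
  simp only [startB]
  intro hflag
  obtain ⟨hk, hfit⟩ := h s hslt (by simpa using hflag)
  have hkk : (k.toNat : Int) = k := Int.toNat_of_nonneg (by omega)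
  have hlow : lowIdx' k fl.length = fl.length + 1 - k.toNat := by unfold lowIdx'; simp [hk]
  omega

-- a start that does not fit stays pending at the end
lemma duePost_ne_nil_of_bad (k : Int) (fl : List Bool) (s : Nat)
    (hs : s < fl.length) (hflag : fl.getD s false = true)
    (hbad : k < 1 ∨ (fl.length : Int) < (s : Int) + k) :
    duePost k fl ≠ [] := by
  have hlow : lowIdx' k fl.length ≤ s := by
    unfold lowIdx'
    rcases hbad with hb | hb
    · rw [if_neg (by omega)]; omega
    · by_cases hk : 1 ≤ k
      · rw [if_pos hk]
        have hkk : (k.toNat : Int) = k := Int.toNat_of_nonneg (by omega)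
        omega
      · rw [if_neg hk]; omega
  have hmem : ((s : Int) + k) ∈ duePost k fl := by
    unfold duePost dueFrom
    apply List.mem_map.mpr
    refine ⟨s, List.mem_filter.mpr ⟨List.mem_range'_1.mpr ⟨hlow, by omega⟩, ?_⟩, rfl⟩
    simpa [startB] using hflag
  intro hnil
  rw [hnil] at hmem
  simp at hmem

-- extFl only appends: earlier flags are stable
lemma extFl_prefix (k : Int) (cs : List Char) : ∀ (fl : List Bool), ∃ tl, extFl k fl cs = fl ++ tl := by
  induction cs with
  | nil => intro fl; exact ⟨[], by simp [extFl]⟩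
  | cons c cs ih =>
    intro fl
    obtain ⟨tl, htl⟩ := ih (fl ++ [decideStart k fl (c == '+')])
    exact ⟨[decideStart k fl (c == '+')] ++ tl, by rw [extFl, htl, List.append_assoc]⟩

lemma extFl_getD (k : Int) (cs : List Char) (fl : List Bool) (s : Nat) (hs : s < fl.length) :
    (extFl k fl cs).getD s false = fl.getD s false := by
  obtain ⟨tl, htl⟩ := extFl_prefix k cs fl
  rw [htl, List.getD_eq_getElem?_getD, List.getElem?_append_left hs, ← List.getD_eq_getElem?_getD]

-- one unfolding step of B's loop
lemma calcBGo_succ (minus : List Bool) (k flips : Int) (f : List Bool) (rem : Nat) :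
    calcBGo minus k flips f (rem + 1) =
      (if ((minus.getD f.length false).xor (mPrevB minus f.length)).xor (prevB k f) then
        if k < 1 ∨ (f.length : Int) + k > (minus.length : Int) then "IMPOSSIBLE"
        else calcBGo minus k (flips + 1)
          (f ++ [((minus.getD f.length false).xor (mPrevB minus f.length)).xor (prevB k f)]) rem
      else calcBGo minus k flips
          (f ++ [((minus.getD f.length false).xor (mPrevB minus f.length)).xor (prevB k f)]) rem) := rfl

-- master induction for B's loop
lemma mainB (k : Int) (minus : List Bool) :
    ∀ (rest : List Char) (fl : List Bool),
      minus.drop fl.length = rest.map (fun c => c != '+') →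
      fl.length + rest.length = minus.length →
      parB k fl = ((mPrevB minus fl.length).xor (prevB k fl)) →
      (∀ s, s < fl.length → fl.getD s false = true → 1 ≤ k ∧ (s : Int) + k ≤ (minus.length : Int)) →
      calcBGo minus k (cnt fl) fl rest.length =
        (if duePost k (extFl k fl rest) = []
         then PySem.Int.toStr (cnt (extFl k fl rest)) else "IMPOSSIBLE") := by
  intro rest
  induction rest with
  | nil =>
    intro fl hsuf hlen hinv hfeas
    have hfl : fl.length = minus.length := by simpa using hlen
    have hnil : duePost k (extFl k fl []) = [] := by
      rw [extFl]
      exact duePost_nil_of_feas k fl (fun s hs hf => by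
        obtain ⟨h1, h2⟩ := hfeas s hs hf
        exact ⟨h1, by rw [hfl]; exact h2⟩)
    rw [extFl] at hnil ⊢
    rw [if_pos hnil]
    rfl
  | cons ch rest' ih =>
    intro fl hsuf hlen hinv hfeas
    set j := fl.length with hj
    -- the head of the remaining minus-list
    have hm : minus.getD j false = (ch != '+') := by
      have h1 : (minus.drop j)[0]? = minus[j]? := by
        rw [List.getElem?_drop]
        norm_num
      rw [List.getD_eq_getElem?_getD, ← h1, hsuf]
      simp
    -- the flag B computes is the greedy decision
    have hfj : ((minus.getD j false).xor (mPrevB minus j)).xor (prevB k fl)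
        = decideStart k fl (ch == '+') := by
      unfold decideStart
      have hpar : decide ((duePost k fl).length % 2 = 1) = (mPrevB minus j).xor (prevB k fl) := hinv
      rw [hpar, hm]
      have hne : (ch != '+') = !(ch == '+') := by simp [bne]
      rw [hne]
      generalize (ch == '+') = b
      generalize (mPrevB minus j) = x
      generalize (prevB k fl) = y
      cases b <;> cases x <;> cases y <;> rfl
    have hExt : extFl k fl (ch :: rest') = extFl k (fl ++ [decideStart k fl (ch == '+')]) rest' := rfl
    -- unfold one step of calcBGo
    simp only [List.length_cons]
    rw [calcBGo_succ, ← hj, hfj]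
    set d := decideStart k fl (ch == '+') with hdd
    have hd' : d = (((minus.getD fl.length false).xor (mPrevB minus fl.length)).xor (prevB k fl)) := hfj.symm
    -- common facts for the recursive calls
    have hsuf' : minus.drop (fl ++ [d]).length = rest'.map (fun c => c != '+') := by
      have h1 : (fl ++ [d]).length = j + 1 := by simp [hj]
      rw [h1]
      have h2 : minus.drop (j + 1) = (minus.drop j).drop 1 := by
        rw [List.drop_drop]
      rw [h2, hsuf]
      simp
    have hlen' : (fl ++ [d]).length + rest'.length = minus.length := by
      simp [hj] at hlen ⊢; omega
    have hinv' : parB k (fl ++ [d]) = ((mPrevB minus (fl ++ [d]).length).xor (prevB k (fl ++ [d]))) := by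
      have h := inv_step k minus fl d hd' hinv
      simpa using h
    cases hdv : d with
    | false =>
      -- no flip forced here
      have hfeas' : ∀ s, s < (fl ++ [d]).length → (fl ++ [d]).getD s false = true →
          1 ≤ k ∧ (s : Int) + k ≤ (minus.length : Int) := by
        intro s hs hf
        rcases Nat.lt_or_ge s fl.length with hlt | hge
        · exact hfeas s hlt (by
            rw [List.getD_eq_getElem?_getD, List.getElem?_append_left hlt, ← List.getD_eq_getElem?_getD] at hf
            exact hf)
        · exfalso
          have hseq : s = fl.length := by simp at hs; omega
          rw [hseq] at hf
          simp [hdv] at hf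
      have hcnt : cnt fl = cnt (fl ++ [d]) := by rw [cnt_append, hdv]; simp
      rw [hcnt]
      have h := ih (fl ++ [d]) hsuf' hlen' hinv' hfeas'
      rw [hExt, hdv] at *
      exact h
    | true =>
      by_cases hbad : k < 1 ∨ (j : Int) + k > (minus.length : Int)
      · rw [if_pos hbad]
        -- A is also IMPOSSIBLE: the start at j never clears
        have hFLlen : (extFl k (fl ++ [d]) rest').length = minus.length := by
          rw [extFl_length]
          simp [hj] at hlen ⊢
          omega
        have hjlt : j < (extFl k (fl ++ [d]) rest').length := by
          rw [hFLlen]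
          simp [hj] at hlen
          omega
        have hflag : (extFl k (fl ++ [d]) rest').getD j false = true := by
          rw [extFl_getD k rest' (fl ++ [d]) j (by simp [hj])]
          rw [List.getD_eq_getElem?_getD]
          have : (fl ++ [d])[j]? = some d := by
            rw [List.getElem?_append_right (by omega)]
            simp [hj]
          rw [this, hdv]
          rfl
        have hne : duePost k (extFl k (fl ++ [d]) rest') ≠ [] := by
          apply duePost_ne_nil_of_bad k _ j hjlt hflag
          rcases hbad with hb | hb
          · exact Or.inl hb
          · right; rw [hFLlen]; omega
        rw [hExt, if_neg hne]
        simp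
      · rw [if_neg hbad]
        push_neg at hbad
        have hfeas' : ∀ s, s < (fl ++ [d]).length → (fl ++ [d]).getD s false = true →
            1 ≤ k ∧ (s : Int) + k ≤ (minus.length : Int) := by
          intro s hs hf
          rcases Nat.lt_or_ge s fl.length with hlt | hge
          · exact hfeas s hlt (by
              rw [List.getD_eq_getElem?_getD, List.getElem?_append_left hlt, ← List.getD_eq_getElem?_getD] at hf
              exact hf)
          · have hseq : s = fl.length := by simp at hs; omega
            rw [hseq, ← hj]
            exact ⟨by omega, hbad.2⟩
        have hcnt : cnt fl + 1 = cnt (fl ++ [d]) := by rw [cnt_append, hdv]; simp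
        rw [hcnt]
        have h := ih (fl ++ [d]) hsuf' hlen' hinv' hfeas'
        rw [hExt, hdv] at *
        exact h

-- B's result in terms of the greedy flag list
lemma B_char (pan : String) (k : Int) :
    calc_py_alt pan k =
      (if duePost k (extFl k [] pan.toList) = []
       then PySem.Int.toStr (cnt (extFl k [] pan.toList)) else "IMPOSSIBLE") := by
  unfold calc_py_alt
  dsimp only
  set minus := pan.toList.map (fun c => c != '+') with hminus
  have h0 : duePost k ([] : List Bool) = [] := by
    unfold duePost dueFrom lowIdx'; split <;> simp
  have hinv0 : parB k ([] : List Bool) = ((mPrevB minus 0).xor (prevB k [])) := by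
    unfold parB mPrevB prevB
    rw [h0]
    rw [if_neg (by omega : ¬ (0 < 0)), if_neg (by rintro ⟨h1, h2⟩; simp at h2; omega)]
    decide
  have hlen0 : ([] : List Bool).length + pan.toList.length = minus.length := by simp [hminus]
  have hsuf0 : minus.drop ([] : List Bool).length = pan.toList.map (fun c => c != '+') := by
    simp [hminus]
  have h := mainB k minus pan.toList [] hsuf0 hlen0 hinv0 (by intro s hs; simp at hs)
  have hcnt0 : cnt ([] : List Bool) = 0 := by simp [cnt]
  rw [hcnt0] at h
  exact h

-- ===== VERDICT (by name: the statement is the Claim_ definition above) =====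
theorem calc_py_spec : Claim_equal_calc_py := by
  intro pan k _
  unfold Spec_calc_py
  rw [A_char, B_char]
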